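-- pv_equiv track=rewrite | github.com/Footleg/PiWars2019 | RockyRover.py | getMenuBtn
-- ===== SOURCE A (Python) =====
-- borderX = 50
--
-- borderY = 35
--
-- sepX = 250
--
-- sepY = 225
--
-- def getMenuBtn(pos):
--     """ Returns the index of the button which the position matches on the screen menu.
--         Returns -1 if no button at position.
--     """
--     x = pos[0] - borderX
--     y = pos[1] - borderY
--     btnWidth = 180
--     col = -1
--     row = -1
--     btn = -1
--     numCols = 3
--     numRows = 2
--
--     #Determine button column from X position
--     while x > 0 :
--         if x < btnWidth :
--             #Position inside btn area
--             col += 1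
--             break
--         elif x > sepX:
--             #Position beyond seperation to next btn area
--             x -= sepX
--             col += 1
--         else:
--             #Position in between btn areas
--             col = -1
--             break
--
--     if col >= 0 and col < numCols :
--         #Determine button row from Y position
--         while y > 0 :
--             if y < btnWidth :
--                 #Position inside btn area
--                 row += 1
--                 break
--             elif y > sepY:
--                 #Position beyond seperation to next btn area
--                 y -= sepY
--                 row += 1
--             else:
--                 #Position in between btn areas
--                 row = -1
--                 break
--
--         if row >= 0 and row < numRows :
--             btn = (numCols * row) + col
--
--     return btn
-- ===== SOURCE B (Python) =====
-- def getMenuBtn(pos):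
--     """ Returns the index of the button which the position matches on the screen menu.
--         Returns -1 if no button at position.
--     """
--     x = pos[0] - 50
--     y = pos[1] - 35
--     if x <= 0 or y <= 0:
--         return -1
--     colq, colr = divmod(x - 1, 250)
--     rowq, rowr = divmod(y - 1, 225)
--     if colr >= 179 or colq > 2 or rowr >= 179 or rowq > 1:
--         return -1
--     return 3 * rowq + colq
-- ===== Notes on version B (the rewrite author's own statement) =====
-- stated objective: simpler
-- what changed: Replaces the two subtract-250/225 scan loops with a closed-form divmod computing column/row index and remainder directly.
import Mathlib
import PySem

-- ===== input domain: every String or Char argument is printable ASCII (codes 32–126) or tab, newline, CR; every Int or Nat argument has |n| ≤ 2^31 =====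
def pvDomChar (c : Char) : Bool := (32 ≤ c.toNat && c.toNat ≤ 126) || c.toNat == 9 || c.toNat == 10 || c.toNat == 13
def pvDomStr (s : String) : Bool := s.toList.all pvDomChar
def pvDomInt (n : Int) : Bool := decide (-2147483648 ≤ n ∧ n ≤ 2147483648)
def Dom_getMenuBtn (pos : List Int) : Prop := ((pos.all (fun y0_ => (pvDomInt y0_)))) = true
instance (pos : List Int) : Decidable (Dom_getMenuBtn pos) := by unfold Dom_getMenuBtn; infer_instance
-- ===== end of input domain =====

-- B replaces A's repeated-subtraction loops with a closed-form divmod (loop-free, simpler).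
-- ===== PORT A =====
-- A's column while-loop: while x > 0: if x < 180: col += 1; break; elif x > 250: x -= 250; col += 1; else: col = -1; break
def pvLoopCol (x col : Int) : Int :=
  if _h : x > 0 then
    if x < 180 then col + 1
    else if x > 250 then pvLoopCol (x - 250) (col + 1)
    else -1
  else col
termination_by x.toNat
decreasing_by omega

-- A's row while-loop (sepY = 225)
def pvLoopRow (y row : Int) : Int :=
  if _h : y > 0 then
    if y < 180 then row + 1
    else if y > 225 then pvLoopRow (y - 225) (row + 1)
    else -1
  else row
termination_by y.toNat
decreasing_by omega

def getMenuBtn (pos : List Int) : Int :=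
  match PySem.List.pyGet? pos 0, PySem.List.pyGet? pos 1 with
  | some p0, some p1 =>
    let x := p0 - 50
    let y := p1 - 35
    let col := pvLoopCol x (-1)
    if col ≥ 0 ∧ col < 3 then
      let row := pvLoopRow y (-1)
      if row ≥ 0 ∧ row < 2 then 3 * row + col else -1
    else -1
  | _, _ => 0   -- unreachable: Pre_ requires two elements (Python raises IndexError)

-- ===== PORT B =====
def getMenuBtn_alt (pos : List Int) : Int :=
  (((PySem.List.pyGet? pos 0).bind fun p0 =>
    (PySem.List.pyGet? pos 1).map fun p1 =>
    let x := p0 - 50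
    let y := p1 - 35
    if x ≤ 0 ∨ y ≤ 0 then -1
    else
      let colq := PySem.Int.floordiv (x - 1) 250
      let colr := PySem.Int.mod (x - 1) 250
      let rowq := PySem.Int.floordiv (y - 1) 225
      let rowr := PySem.Int.mod (y - 1) 225
      if colr ≥ 179 ∨ colq > 2 ∨ rowr ≥ 179 ∨ rowq > 1 then -1
      else 3 * rowq + colq).getD 0)   -- none unreachable under Pre_

-- ===== PRECONDITION & SPEC =====
-- Pre_ excludes lists with fewer than 2 elements, on which Python A raises IndexError.
def Pre_getMenuBtn (pos : List Int) : Prop := 2 ≤ pos.length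
instance (pos : List Int) : Decidable (Pre_getMenuBtn pos) := by unfold Pre_getMenuBtn; infer_instance
def pvWitness_getMenuBtn : List Int := [60, 40]

def Spec_getMenuBtn (pos : List Int) (out : Int) : Prop := out = getMenuBtn_alt pos
instance (pos : List Int) (out : Int) : Decidable (Spec_getMenuBtn pos out) := by unfold Spec_getMenuBtn; infer_instance

-- ===== CLAIM (what is proved, stated in full; the proofs are below) =====
def Claim_equal_getMenuBtn : Prop := ∀ (pos : List Int), Dom_getMenuBtn pos → Pre_getMenuBtn pos → Spec_getMenuBtn pos (getMenuBtn pos)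

-- ===== LEMMAS AND PROOFS =====
lemma pvLoopCol_eq_aux : ∀ (n : Nat) (x col : Int), x.toNat ≤ n → 0 < x →
    pvLoopCol x col = if (x - 1) % 250 < 179 then col + 1 + (x - 1) / 250 else -1 := by
  intro n
  induction n with
  | zero => intro x col h hx; omega
  | succ n ih =>
    intro x col h hx
    rw [pvLoopCol]
    by_cases h1 : x < 180
    · simp only [hx, dif_pos, if_pos h1]
      have : (x - 1) % 250 = x - 1 := Int.emod_eq_of_lt (by omega) (by omega)
      have h2 : (x - 1) / 250 = 0 := Int.ediv_eq_zero_of_lt (by omega) (by omega)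
      simp [this, h2]; omega
    · by_cases h2 : x > 250
      · simp only [hx, dif_pos, if_neg h1, if_pos h2]
        rw [ih (x - 250) (col + 1) (by omega) (by omega)]
        have hm : (x - 250 - 1) % 250 = (x - 1) % 250 := by omega
        have hd : (x - 250 - 1) / 250 = (x - 1) / 250 - 1 := by omega
        rw [hm, hd]
        split <;> omega
      · simp only [hx, dif_pos, if_neg h1, if_neg h2]
        have : (x - 1) % 250 = x - 1 := Int.emod_eq_of_lt (by omega) (by omega)
        simp [this]; omega

lemma pvLoopCol_eq (x col : Int) (hx : 0 < x) :
    pvLoopCol x col = if (x - 1) % 250 < 179 then col + 1 + (x - 1) / 250 else -1 :=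
  pvLoopCol_eq_aux x.toNat x col le_rfl hx

lemma pvLoopRow_eq_aux : ∀ (n : Nat) (y row : Int), y.toNat ≤ n → 0 < y →
    pvLoopRow y row = if (y - 1) % 225 < 179 then row + 1 + (y - 1) / 225 else -1 := by
  intro n
  induction n with
  | zero => intro y row h hy; omega
  | succ n ih =>
    intro y row h hy
    rw [pvLoopRow]
    by_cases h1 : y < 180
    · simp only [hy, dif_pos, if_pos h1]
      have : (y - 1) % 225 = y - 1 := Int.emod_eq_of_lt (by omega) (by omega)
      have h2 : (y - 1) / 225 = 0 := Int.ediv_eq_zero_of_lt (by omega) (by omega)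
      simp [this, h2]; omega
    · by_cases h2 : y > 225
      · simp only [hy, dif_pos, if_neg h1, if_pos h2]
        rw [ih (y - 225) (row + 1) (by omega) (by omega)]
        have hm : (y - 225 - 1) % 225 = (y - 1) % 225 := by omega
        have hd : (y - 225 - 1) / 225 = (y - 1) / 225 - 1 := by omega
        rw [hm, hd]
        split <;> omega
      · simp only [hy, dif_pos, if_neg h1, if_neg h2]
        have : (y - 1) % 225 = y - 1 := Int.emod_eq_of_lt (by omega) (by omega)
        simp [this]; omega

lemma pvLoopRow_eq (y row : Int) (hy : 0 < y) :
    pvLoopRow y row = if (y - 1) % 225 < 179 then row + 1 + (y - 1) / 225 else -1 :=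
  pvLoopRow_eq_aux y.toNat y row le_rfl hy

lemma pvLoopCol_nonpos (x col : Int) (hx : ¬ 0 < x) : pvLoopCol x col = col := by
  rw [pvLoopCol]; simp [hx]

lemma pvLoopRow_nonpos (y row : Int) (hy : ¬ 0 < y) : pvLoopRow y row = row := by
  rw [pvLoopRow]; simp [hy]

-- core arithmetic equivalence for two given coordinates
lemma pv_core (p0 p1 : Int) :
    (let x := p0 - 50
     let y := p1 - 35
     let col := pvLoopCol x (-1)
     if col ≥ 0 ∧ col < 3 then
       let row := pvLoopRow y (-1)
       if row ≥ 0 ∧ row < 2 then 3 * row + col else -1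
     else -1)
    =
    (let x := p0 - 50
     let y := p1 - 35
     if x ≤ 0 ∨ y ≤ 0 then -1
     else
       let colq := PySem.Int.floordiv (x - 1) 250
       let colr := PySem.Int.mod (x - 1) 250
       let rowq := PySem.Int.floordiv (y - 1) 225
       let rowr := PySem.Int.mod (y - 1) 225
       if colr ≥ 179 ∨ colq > 2 ∨ rowr ≥ 179 ∨ rowq > 1 then -1
       else 3 * rowq + colq) := by
  simp only []
  set x := p0 - 50 with hxdef
  set y := p1 - 35 with hydef
  rw [PySem.Int.floordiv_eq_ediv_of_pos (a := x - 1) (by norm_num),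
      PySem.Int.mod_eq_emod_of_pos (a := x - 1) (by norm_num),
      PySem.Int.floordiv_eq_ediv_of_pos (a := y - 1) (by norm_num),
      PySem.Int.mod_eq_emod_of_pos (a := y - 1) (by norm_num)]
  by_cases hx : 0 < x
  · rw [pvLoopCol_eq _ _ hx]
    by_cases hy : 0 < y
    · rw [pvLoopRow_eq _ _ hy]
      have hcm := Int.emod_nonneg (x - 1) (by norm_num : (250:Int) ≠ 0)
      have hrm := Int.emod_nonneg (y - 1) (by norm_num : (225:Int) ≠ 0)
      have hcd : 0 ≤ (x - 1) / 250 := Int.ediv_nonneg (by omega) (by norm_num)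
      have hrd : 0 ≤ (y - 1) / 225 := Int.ediv_nonneg (by omega) (by norm_num)
      simp only [if_neg (by omega : ¬ (x ≤ 0 ∨ y ≤ 0))]
      split_ifs <;> omega
    · rw [pvLoopRow_nonpos _ _ hy]
      have hcm := Int.emod_nonneg (x - 1) (by norm_num : (250:Int) ≠ 0)
      have hcd : 0 ≤ (x - 1) / 250 := Int.ediv_nonneg (by omega) (by norm_num)
      simp only [if_pos (by omega : x ≤ 0 ∨ y ≤ 0)]
      split_ifs <;> omega
  · rw [pvLoopCol_nonpos _ _ hx]
    simp only [if_pos (by omega : x ≤ 0 ∨ y ≤ 0)]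
    norm_num

-- ===== VERDICT (by name: the statement is the Claim_ definition above) =====
theorem getMenuBtn_spec : Claim_equal_getMenuBtn := by
  intro pos _hdom hpre
  unfold Spec_getMenuBtn getMenuBtn
  match pos, hpre with
  | p0 :: p1 :: rest, _ =>
    have h0 : PySem.List.pyGet? (p0 :: p1 :: rest) (0 : Int) = some p0 := by
      simp [PySem.List.pyGet?, PySem.List.pyIdx?, show (0:Int) ≤ (rest.length:Int) + 1 by omega]
    have h1 : PySem.List.pyGet? (p0 :: p1 :: rest) (1 : Int) = some p1 := by
      simp [PySem.List.pyGet?, PySem.List.pyIdx?]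
    unfold getMenuBtn_alt
    rw [h0, h1]
    simp only [Option.bind_some, Option.map_some, Option.getD_some]
    exact pv_core p0 p1
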